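-- pv_equiv track=rewrite | github.com/devmindtan/DataStructures-Algorithms | GeeksForGeeks/Pratice Problems/Basic/Binary String.py | binarySubstring_c1
-- ===== SOURCE A (Python) =====
-- def binarySubstring_c1(s):
--     check = 0
--     for i in range(len(s)):
--         if (s[i] == "1"):
--             for j in range(len(s) - 1, i, -1):
--                 if (s[j] == "1"):
--                     check += 1
--     return check
--
-- s = "1111"
-- ===== SOURCE B (Python) =====
-- def binarySubstring_c1(s):
--     k = sum(1 for ch in s if ch == "1")
--     return k * (k - 1) // 2
-- ===== Notes on version B (the rewrite author's own statement) =====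
-- stated objective: faster
-- what changed: Replace the quadratic nested index loops by a single pass that counts the ones k and returns the closed form k*(k-1)//2.
import Mathlib
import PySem

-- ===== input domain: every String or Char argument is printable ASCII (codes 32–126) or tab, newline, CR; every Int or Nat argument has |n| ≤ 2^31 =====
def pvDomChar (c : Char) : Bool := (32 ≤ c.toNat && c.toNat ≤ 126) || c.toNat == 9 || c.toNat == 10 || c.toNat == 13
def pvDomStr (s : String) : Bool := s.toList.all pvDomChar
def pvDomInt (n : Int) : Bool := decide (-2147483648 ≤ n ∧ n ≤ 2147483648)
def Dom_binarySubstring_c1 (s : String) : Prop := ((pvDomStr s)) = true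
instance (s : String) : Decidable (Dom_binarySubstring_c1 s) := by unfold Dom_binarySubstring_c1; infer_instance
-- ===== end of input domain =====

-- B replaces A's quadratic nested index loops by a one-pass count of ones k and the closed form k*(k-1)//2 (asymptotically faster).

-- ===== PORT A =====
-- literal transliteration of A's nested loops over range(len(s)) and range(len(s)-1, i, -1)
def binarySubstring_c1 (s : String) : Int :=
  let cs := s.toList
  let n : Int := (cs.length : Int)
  (PySem.List.pyRange 0 n 1).foldl
    (fun check i =>
      if PySem.List.pyGetD cs i ' ' == '1' then
        (PySem.List.pyRange (n - 1) i (-1)).foldl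
          (fun check j => if PySem.List.pyGetD cs j ' ' == '1' then check + 1 else check)
          check
      else check)
    0

-- ===== PORT B =====
-- k = sum(1 for ch in s if ch == "1"); k * (k - 1) // 2
def binarySubstring_c1_alt (s : String) : Int :=
  let k : Int := s.toList.foldl (fun acc ch => if ch == '1' then acc + 1 else acc) 0
  PySem.Int.floordiv (k * (k - 1)) 2

-- ===== PRECONDITION & SPEC =====
def Spec_binarySubstring_c1 (s : String) (out : Int) : Prop := out = binarySubstring_c1_alt s
instance (s : String) (out : Int) : Decidable (Spec_binarySubstring_c1 s out) := by unfold Spec_binarySubstring_c1; infer_instance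

-- ===== CLAIM (what is proved, stated in full; the proofs are below) =====
def Claim_equal_binarySubstring_c1 : Prop := ∀ (s : String), Dom_binarySubstring_c1 s → Spec_binarySubstring_c1 s (binarySubstring_c1 s)

-- ===== LEMMAS AND PROOFS =====

-- Sum over i of [s[i]='1'] * (number of ones after i), recursively.
def pvPairsum : List Char → Int
  | [] => 0
  | c :: t => (if c == '1' then ((t.countP (· == '1') : Nat) : Int) else 0) + pvPairsum t

-- A's inner countdown loop counts the ones strictly after position i.
lemma pv_inner (l : List Char) (i check : Int) (hi : 0 ≤ i) :
    (PySem.List.pyRange ((l.length : Int) - 1) i (-1)).foldl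
      (fun check j => if PySem.List.pyGetD l j ' ' == '1' then check + 1 else check) check
    = check + ((l.drop (i + 1).toNat).countP (· == '1') : Int) := by
  rw [PySem.List.pyRange_neg_one_eq_reverse]
  have h1 : (l.length : Int) - 1 + 1 = (l.length : Int) := by ring
  rw [h1, PySem.List.foldl_if_add_one]
  rw [List.countP_reverse]
  have h2 : (PySem.List.pyRange (i + 1) (l.length : Int)).countP
      (fun j => PySem.List.pyGetD l j ' ' == '1')
      = ((PySem.List.pyRange (i + 1) (l.length : Int)).map
          (fun j => PySem.List.pyGetD l j ' ')).countP (· == '1') := by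
    rw [List.countP_map]; rfl
  rw [h2]
  rw [show ((l.length : Int)) = PySem.List.len l from rfl]
  rw [PySem.List.map_pyGetD_pyRange l ' ' (by omega : (0:Int) ≤ i + 1)]

-- Nat-indexed form of the outer sum.
lemma pv_aux (l : List Char) :
    ((List.range l.length).map
      (fun k => if l.getD k ' ' == '1'
        then ((l.drop (k + 1)).countP (· == '1') : Int) else 0)).sum = pvPairsum l := by
  induction l with
  | nil => simp [pvPairsum]
  | cons c t ih =>
    rw [List.length_cons, List.range_succ_eq_map, List.map_cons, List.map_map, List.sum_cons]
    have ht : List.map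
        ((fun k => if (c :: t).getD k ' ' == '1'
          then (((c :: t).drop (k + 1)).countP (· == '1') : Int) else 0) ∘ Nat.succ)
        (List.range t.length)
        = List.map (fun k => if t.getD k ' ' == '1'
            then ((t.drop (k + 1)).countP (· == '1') : Int) else 0) (List.range t.length) := by
      refine List.map_congr_left ?_
      intro k _
      simp [Function.comp, Nat.succ_eq_add_one]
    rw [ht, ih, pvPairsum]
    simp

-- Closed form: twice the pair sum is k*(k-1).
lemma pv_closed (l : List Char) :
    2 * pvPairsum l = (l.countP (· == '1') : Int) * ((l.countP (· == '1') : Int) - 1) := by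
  induction l with
  | nil => simp [pvPairsum]
  | cons c t ih =>
    rw [pvPairsum, List.countP_cons]
    by_cases hc : c == '1'
    · simp only [hc, if_pos]
      push_cast
      linear_combination ih
    · simp only [hc]
      simpa using ih

-- B's counting fold is countP.
lemma pv_count (l : List Char) :
    l.foldl (fun acc ch => if ch == '1' then acc + 1 else acc) 0
      = (l.countP (· == '1') : Int) := by
  rw [PySem.List.foldl_beq_add_one]
  simp [List.count]

-- ===== VERDICT (by name: the statement is the Claim_ definition above) =====
theorem binarySubstring_c1_spec : Claim_equal_binarySubstring_c1 := by
  intro s _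
  unfold Spec_binarySubstring_c1 binarySubstring_c1 binarySubstring_c1_alt
  set l := s.toList with hl
  -- rewrite the outer loop body using pv_inner, then split off the sum
  have hbody : ∀ (check i : Int), i ∈ PySem.List.pyRange 0 (l.length : Int) 1 →
      (if PySem.List.pyGetD l i ' ' == '1' then
        (PySem.List.pyRange ((l.length : Int) - 1) i (-1)).foldl
          (fun check j => if PySem.List.pyGetD l j ' ' == '1' then check + 1 else check)
          check
      else check)
      = check + (if PySem.List.pyGetD l i ' ' == '1'
          then ((l.drop (i + 1).toNat).countP (· == '1') : Int) else 0) := by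
    intro check i hi
    have h0 : 0 ≤ i := (PySem.List.mem_pyRange_one.1 hi).1
    by_cases hc : PySem.List.pyGetD l i ' ' == '1'
    · rw [if_pos hc, if_pos hc, pv_inner l i check h0]
    · rw [if_neg hc, if_neg hc, add_zero]
  rw [PySem.List.foldl_congr_mem _ _ _ _ hbody]
  rw [PySem.List.foldl_add, zero_add]
  -- convert the pyRange-indexed sum to the Nat-indexed sum
  have hmap : ((PySem.List.pyRange 0 (l.length : Int) 1).map
      (fun i => if PySem.List.pyGetD l i ' ' == '1'
        then ((l.drop (i + 1).toNat).countP (· == '1') : Int) else 0))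
      = ((List.range l.length).map
        (fun k => if l.getD k ' ' == '1'
          then ((l.drop (k + 1)).countP (· == '1') : Int) else 0)) := by
    rw [PySem.List.pyRange_zero_nat, List.map_map]
    refine List.map_congr_left ?_
    intro k _
    simp only [Function.comp, PySem.List.pyGetD_natCast]
    have : ((k : Int) + 1).toNat = k + 1 := by omega
    rw [this]
  rw [hmap, pv_aux, pv_count]
  have h2 := pv_closed l
  rw [PySem.Int.floordiv_eq_ediv_of_pos (by omega : (0:Int) < 2)]
  omega
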